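-- pv_equiv track=rewrite | github.com/duspic/schrotomath | app/solver.py | predictionsToEquation
-- ===== SOURCE A (Python) =====
-- def classToSymbol(label):
--     # Simply decypher what math symbol represents the given label
--
--     pairs = {
--         "minus":"-",
--         "plus":"+",
--         "multi":"*",
--         "div":"/",
--         "(":"(",
--         ")":")"
--         }
--
--     return pairs[label]
--
-- def groupDigits(equation):
--     # Each character is parsed separately, but numbers aren't always single characters
--     # Group all consecutive digits in a list
--
--     output = []
--     number = ""
--
--     for char in equation:
--         if char.isdigit():
--             number += char
--         else:
--             if number:
--                 output.append(number)
--                 number = ""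
--             output += char
--
--     if number:
--         output.append(number)
--
--     return output
--
-- def predictionsToEquation(predictions):
--     # Takes list of predicted characters and processes them
--     # meanwhile cleaning up the eventual messy predictions
--
--     # A simple rule is that [')','multi','plus','div'] must come after a digit or a right parenthesis
--     # If they don't follow the rule, just ^rule^ them out as a mistake by a predictor
--
--     # It would be wiser to try to intelligently assume what was mispredicted...
--
--     rule_condition = False
--     output = []
--
--     for char in predictions:
--         if char.isdigit():
--             output += char
--             rule_condition = True
--
--         elif char in ['(','minus']:
--             char = classToSymbol(char)
--             output += char
--             rule_condition = False
--
--         elif char in [')','multi','plus','div']: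
--             if rule_condition:
--                 char = classToSymbol(char)
--                 output += char
--                 rule_condition = True if char == ')' else False
--             else:
--                 continue
--
--     return groupDigits(output)
-- ===== SOURCE B (Python) =====
-- def predictionsToEquation(predictions):
--     # Single pass: maintains rule_condition and a pending-number accumulator,
--     # grouping consecutive digits inline instead of a second groupDigits pass.
--     symbol = {"minus": "-", "plus": "+", "multi": "*", "div": "/", "(": "(", ")": ")"}
--     output = []
--     number = ""
--     rule_condition = False
--     for p in predictions:
--         if p.isdigit():
--             number += p
--             rule_condition = True
--         elif p in ("(", "minus"):
--             if number:
--                 output.append(number)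
--                 number = ""
--             output.append(symbol[p])
--             rule_condition = False
--         elif p in (")", "multi", "plus", "div") and rule_condition:
--             if number:
--                 output.append(number)
--                 number = ""
--             output.append(symbol[p])
--             rule_condition = (p == ")")
--     if number:
--         output.append(number)
--     return output
-- ===== Notes on version B (the rewrite author's own statement) =====
-- stated objective: simpler
-- what changed: B does a single pass that flushes a pending-number accumulator inline, instead of A's two passes (emit single characters, then the separate groupDigits rescan that regroups consecutive digits).
import Mathlib
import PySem

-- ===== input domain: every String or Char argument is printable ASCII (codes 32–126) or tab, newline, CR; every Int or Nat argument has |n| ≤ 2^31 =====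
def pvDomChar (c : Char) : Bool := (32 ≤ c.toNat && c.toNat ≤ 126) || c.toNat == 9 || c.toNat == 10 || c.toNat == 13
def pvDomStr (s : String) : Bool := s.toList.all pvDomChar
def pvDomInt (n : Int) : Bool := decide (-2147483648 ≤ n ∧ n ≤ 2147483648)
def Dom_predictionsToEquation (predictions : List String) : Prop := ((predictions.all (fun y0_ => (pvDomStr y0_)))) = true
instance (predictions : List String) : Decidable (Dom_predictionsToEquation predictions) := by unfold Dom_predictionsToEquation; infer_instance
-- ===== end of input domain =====

-- B replaces A's emit-chars-then-groupDigits two-pass structure by one pass that keeps a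
-- pending-number accumulator, for a simpler single traversal (same return value).

-- ===== PORT A =====
-- the dict literal in classToSymbol
def pvPairs : PySem.Dict String String :=
  PySem.Dict.ofList
    [("minus", "-"), ("plus", "+"), ("multi", "*"), ("div", "/"), ("(", "("), (")", ")")]

-- pairs[label]; Python raises KeyError on a missing label, but every call site guards the
-- label to be a key, so the KeyError case (here "") is unreachable
def classToSymbol (label : String) : String := (pvPairs.get? label).getD ""

-- the for-loop of groupDigits; number is the pending digit string (Python str, held as its chars)
def groupDigitsLoop : List String → List Char → List String → List String
  | [], number, output =>
      if number ≠ [] then output ++ [String.ofList number] else output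
  | ch :: rest, number, output =>
      if PySem.Str.strIsdigit ch then
        groupDigitsLoop rest (number ++ ch.toList) output
      else
        groupDigitsLoop rest []
          ((if number ≠ [] then output ++ [String.ofList number] else output)
            ++ ch.toList.map (fun c => String.ofList [c]))

def groupDigits (equation : List String) : List String := groupDigitsLoop equation [] []

-- the for-loop of predictionsToEquation ('output += char' extends with char's characters)
def predToEqLoop : List String → Bool → List String → List String
  | [], _, output => output
  | ch :: rest, rule, output =>
      if PySem.Str.strIsdigit ch then
        predToEqLoop rest true (output ++ ch.toList.map (fun c => String.ofList [c]))
      else if ch = "(" ∨ ch = "minus" then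
        predToEqLoop rest false (output ++ (classToSymbol ch).toList.map (fun c => String.ofList [c]))
      else if ch = ")" ∨ ch = "multi" ∨ ch = "plus" ∨ ch = "div" then
        if rule then
          predToEqLoop rest (if classToSymbol ch = ")" then true else false)
            (output ++ (classToSymbol ch).toList.map (fun c => String.ofList [c]))
        else
          predToEqLoop rest rule output
      else
        predToEqLoop rest rule output

def predictionsToEquation (predictions : List String) : List String :=
  groupDigits (predToEqLoop predictions false [])

-- ===== PORT B =====
-- Source B's symbol dict
def pvSymbolB : PySem.Dict String String :=
  PySem.Dict.ofList
    [("minus", "-"), ("plus", "+"), ("multi", "*"), ("div", "/"), ("(", "("), (")", ")")]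

-- the single for-loop of B: rule flag, pending number (Python str, held as its chars), output
def altLoop : List String → Bool → List Char → List String → List String
  | [], _, number, output =>
      if number ≠ [] then output ++ [String.ofList number] else output
  | p :: rest, rule, number, output =>
      if PySem.Str.strIsdigit p then
        altLoop rest true (number ++ p.toList) output
      else if p = "(" ∨ p = "minus" then
        altLoop rest false []
          ((if number ≠ [] then output ++ [String.ofList number] else output)
            ++ [(pvSymbolB.get? p).getD ""])
      else if (p = ")" ∨ p = "multi" ∨ p = "plus" ∨ p = "div") ∧ rule = true then
        altLoop rest (decide (p = ")")) []
          ((if number ≠ [] then output ++ [String.ofList number] else output)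
            ++ [(pvSymbolB.get? p).getD ""])
      else
        altLoop rest rule number output

def predictionsToEquation_alt (predictions : List String) : List String :=
  altLoop predictions false [] []

-- ===== PRECONDITION & SPEC =====
def Spec_predictionsToEquation (predictions : List String) (out : List String) : Prop := out = predictionsToEquation_alt predictions
instance (predictions : List String) (out : List String) : Decidable (Spec_predictionsToEquation predictions out) := by unfold Spec_predictionsToEquation; infer_instance

-- ===== CLAIM (what is proved, stated in full; the proofs are below) =====
def Claim_equal_predictionsToEquation : Prop := ∀ (predictions : List String), Dom_predictionsToEquation predictions → Spec_predictionsToEquation predictions (predictionsToEquation predictions)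

-- ===== LEMMAS AND PROOFS =====

theorem gdl_out (eq : List String) : ∀ (number : List Char) (output : List String),
    groupDigitsLoop eq number output = output ++ groupDigitsLoop eq number [] := by
  induction eq with
  | nil => intro number output; simp only [groupDigitsLoop]; split_ifs <;> simp
  | cons ch rest ih =>
    intro number output
    by_cases h1 : PySem.Str.strIsdigit ch = true
    · simp only [groupDigitsLoop, if_pos h1]
      exact ih _ output
    · simp only [groupDigitsLoop, if_neg h1]
      rw [ih [] ((if number ≠ [] then output ++ _ else output) ++ _),
        ih [] ((if number ≠ [] then ([] : List String) ++ _ else []) ++ _)]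
      split_ifs <;> simp

theorem aLoop_out (ps : List String) : ∀ (rule : Bool) (output : List String),
    predToEqLoop ps rule output = output ++ predToEqLoop ps rule [] := by
  induction ps with
  | nil => intro rule output; simp [predToEqLoop]
  | cons ch rest ih =>
    intro rule output
    by_cases h1 : PySem.Str.strIsdigit ch = true
    · simp only [predToEqLoop, if_pos h1]
      rw [ih true (output ++ _), ih true ([] ++ _)]; simp
    · by_cases h2 : ch = "(" ∨ ch = "minus"
      · simp only [predToEqLoop, if_neg h1, if_pos h2]
        rw [ih false (output ++ _), ih false ([] ++ _)]; simp
      · by_cases h3 : ch = ")" ∨ ch = "multi" ∨ ch = "plus" ∨ ch = "div"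
        · cases rule with
          | true =>
            simp only [predToEqLoop, if_neg h1, if_neg h2, if_pos h3, if_true]
            rw [ih _ (output ++ _), ih _ ([] ++ _)]; simp
          | false =>
            simp only [predToEqLoop, if_neg h1, if_neg h2, if_pos h3, Bool.false_eq_true,
              if_false]
            exact ih false output
        · simp only [predToEqLoop, if_neg h1, if_neg h2, if_neg h3]
          exact ih rule output

theorem altLoop_out (ps : List String) : ∀ (rule : Bool) (number : List Char) (output : List String),
    altLoop ps rule number output = output ++ altLoop ps rule number [] := by
  induction ps with
  | nil => intro rule number output; simp only [altLoop]; split_ifs <;> simp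
  | cons p rest ih =>
    intro rule number output
    by_cases h1 : PySem.Str.strIsdigit p = true
    · simp only [altLoop, if_pos h1]
      exact ih _ _ output
    · by_cases h2 : p = "(" ∨ p = "minus"
      · simp only [altLoop, if_neg h1, if_pos h2]
        rw [ih false [] ((if number ≠ [] then output ++ _ else output) ++ _),
          ih false [] ((if number ≠ [] then ([] : List String) ++ _ else []) ++ _)]
        split_ifs <;> simp
      · by_cases h3 : (p = ")" ∨ p = "multi" ∨ p = "plus" ∨ p = "div") ∧ rule = true
        · simp only [altLoop, if_neg h1, if_neg h2, if_pos h3]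
          rw [ih _ [] ((if number ≠ [] then output ++ _ else output) ++ _),
            ih _ [] ((if number ≠ [] then ([] : List String) ++ _ else []) ++ _)]
          split_ifs <;> simp
        · simp only [altLoop, if_neg h1, if_neg h2, if_neg h3]
          exact ih rule number output

-- feeding a run of single digit characters into groupDigits extends the pending number
theorem gdl_digits (cs : List Char) : ∀ (tail : List String) (number : List Char),
    (∀ c ∈ cs, PySem.Chars.isdigit c = true) →
    groupDigitsLoop (cs.map (fun c => String.ofList [c]) ++ tail) number []
      = groupDigitsLoop tail (number ++ cs) [] := by
  induction cs with
  | nil => intro tail number _; simp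
  | cons c cs ih =>
    intro tail number h
    have hc : PySem.Str.strIsdigit (String.ofList [c]) = true := by
      simp [PySem.Str.strIsdigit_eq, PySem.Chars.strIsdigit, h c (by simp)]
    have htl : (String.ofList [c]).toList = [c] := by simp
    simp only [List.map_cons, List.cons_append, groupDigitsLoop, hc, if_pos, htl]
    rw [ih tail (number ++ [c]) (fun x hx => h x (by simp [hx]))]
    simp

-- a non-digit string flushes the pending number and is emitted character by character
theorem gdl_nondigit (s : String) (tail : List String) (number : List Char)
    (h : PySem.Str.strIsdigit s = false) :
    groupDigitsLoop (s :: tail) number []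
      = (if number ≠ [] then [String.ofList number] else [])
        ++ s.toList.map (fun c => String.ofList [c]) ++ groupDigitsLoop tail [] [] := by
  simp only [groupDigitsLoop, h, Bool.false_eq_true, if_false]
  rw [gdl_out]
  split_ifs <;> simp

-- the heart of the equivalence: B's state (rule, number) tracks A's loop plus grouping
theorem main_inv (ps : List String) : ∀ (rule : Bool) (number : List Char),
    altLoop ps rule number [] = groupDigitsLoop (predToEqLoop ps rule []) number [] := by
  induction ps with
  | nil =>
    intro rule number
    simp [altLoop, predToEqLoop, groupDigitsLoop]
  | cons p rest ih =>
    intro rule number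
    by_cases hd : PySem.Str.strIsdigit p = true
    · -- digit prediction
      have hall : ∀ c ∈ p.toList, PySem.Chars.isdigit c = true := by
        have := hd
        simp [PySem.Str.strIsdigit_eq, PySem.Chars.strIsdigit, List.all_eq_true] at this
        exact this.2
      simp only [altLoop, predToEqLoop, if_pos hd]
      rw [aLoop_out rest true (([] : List String) ++ p.toList.map (fun c => String.ofList [c]))]
      simp only [List.nil_append]
      rw [gdl_digits p.toList _ number hall]
      exact ih true (number ++ p.toList)
    · have hd' : PySem.Str.strIsdigit p = false := by simpa using hd
      by_cases hp : p = "(" ∨ p = "minus"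
      · -- '(' or 'minus': flush, emit symbol, rule := false
        have hsym1 : (classToSymbol p).toList.map (fun c => String.ofList [c])
            = [(pvSymbolB.get? p).getD ""] := by
          rcases hp with h | h <;> subst h <;> decide
        have hsymnd : PySem.Str.strIsdigit ((pvSymbolB.get? p).getD "") = false := by
          rcases hp with h | h <;> subst h <;> decide
        have h1s : ((pvSymbolB.get? p).getD "").toList.map (fun c => String.ofList [c])
            = [(pvSymbolB.get? p).getD ""] := by
          rcases hp with h | h <;> subst h <;> decide
        simp only [altLoop, predToEqLoop, if_neg hd, if_pos hp]
        rw [aLoop_out rest false]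
        simp only [List.nil_append, hsym1, List.singleton_append]
        rw [gdl_nondigit _ _ _ hsymnd, h1s, altLoop_out, ih false []]
      · by_cases hop : p = ")" ∨ p = "multi" ∨ p = "plus" ∨ p = "div"
        · cases rule with
          | false =>
            -- invalid operator: skipped by both, B keeps the pending number (no flush)
            have hB : ¬ ((p = ")" ∨ p = "multi" ∨ p = "plus" ∨ p = "div") ∧ (false : Bool) = true) := by
              simp
            simp only [altLoop, predToEqLoop, if_neg hd, if_neg hp, if_pos hop,
              Bool.false_eq_true, and_false, if_false]
            exact ih false number
          | true =>
            -- valid operator: flush, emit symbol, rule := (p == ')')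
            have hsym1 : (classToSymbol p).toList.map (fun c => String.ofList [c])
                = [(pvSymbolB.get? p).getD ""] := by
              rcases hop with h | h | h | h <;> subst h <;> decide
            have hsymnd : PySem.Str.strIsdigit ((pvSymbolB.get? p).getD "") = false := by
              rcases hop with h | h | h | h <;> subst h <;> decide
            have hrule : (if classToSymbol p = ")" then true else false) = decide (p = ")") := by
              rcases hop with h | h | h | h <;> subst h <;> decide
            have h1s : ((pvSymbolB.get? p).getD "").toList.map (fun c => String.ofList [c])
                = [(pvSymbolB.get? p).getD ""] := by
              rcases hop with h | h | h | h <;> subst h <;> decide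
            have hB : ((p = ")" ∨ p = "multi" ∨ p = "plus" ∨ p = "div") ∧ (true : Bool) = true) :=
              ⟨hop, rfl⟩
            simp only [altLoop, predToEqLoop, if_neg hd, if_neg hp, and_true, if_pos hop,
              if_true, hrule]
            rw [aLoop_out rest _]
            simp only [List.nil_append, hsym1, List.singleton_append]
            rw [gdl_nondigit _ _ _ hsymnd, h1s, altLoop_out, ih (decide (p = ")")) []]
        · -- any other prediction: ignored by both loops
          have hB : ¬ ((p = ")" ∨ p = "multi" ∨ p = "plus" ∨ p = "div") ∧ rule = true) := by
            intro h; exact hop h.1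
          simp only [altLoop, predToEqLoop, if_neg hd, if_neg hp, if_neg hop, if_neg hB]
          exact ih rule number

-- ===== VERDICT (by name: the statement is the Claim_ definition above) =====
theorem predictionsToEquation_spec : Claim_equal_predictionsToEquation := by
  intro predictions _
  unfold Spec_predictionsToEquation predictionsToEquation predictionsToEquation_alt groupDigits
  exact (main_inv predictions false []).symm
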